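-- pv_equiv track=rewrite | github.com/hanxuwu/Learning-Python | Principles of Programming/Assignment/Assignment1/ASS question1.files/pivoting_die.py | Pivoting_die
-- ===== SOURCE A (Python) =====
-- def Pivoting_die(instruction_list,goal_cell_number):
--
--     def right_rule(L):
--         right,front,bottom,top,left,back=L[0],L[1],L[2],L[3],L[4],L[5]
--         L[0],L[1],L[2],L[3],L[4],L[5]=top,front,right,left,bottom,back
--         return L
--
--     def down_rule(L):
--         front,bottom,right,left,back,top,=L[0],L[1],L[2],L[3],L[4],L[5]
--         L[0],L[1],L[2],L[3],L[4],L[5]=top,front,right,left,bottom,back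
--         return L
--
--     def left_rule(L):
--         left,front,top,bottom,right,back=L[0],L[1],L[2],L[3],L[4],L[5]
--         L[0],L[1],L[2],L[3],L[4],L[5]=top,front,right,left,bottom,back
--         return L
--
--     def up_rule(L):
--         back,top,right,left,front,bottom=L[0],L[1],L[2],L[3],L[4],L[5]
--         L[0],L[1],L[2],L[3],L[4],L[5]=top,front,right,left,bottom,back
--         return L
--
--     dice_dict={1:6,2:5,3:4,4:3,5:2,6:1}
--     dice_rule={'right':right_rule,'down':down_rule,'left':left_rule,'up':up_rule}
--     top=3
--     bottom=4
--     front=2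
--     back=5
--     right=1
--     left=6
--     temp=0
--     Dice_list = [top,front,right,left,bottom,back] #top,front,right,left,bottom,back
--     if goal_cell_number==0:
--         return Dice_list
--     else:
--         for i in range(goal_cell_number):
--                 dice_rule[instruction_list[i]](Dice_list)
--
--         return Dice_list
-- ===== SOURCE B (Python) =====
-- # Right face as a function of (top, front): 24 legal orientations.
-- _RIGHT = {(1, 2): 4, (1, 3): 2, (1, 4): 5, (1, 5): 3, (2, 1): 3, (2, 3): 6,
--           (2, 4): 1, (2, 6): 4, (3, 1): 5, (3, 2): 1, (3, 5): 6, (3, 6): 2,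
--           (4, 1): 2, (4, 2): 6, (4, 5): 1, (4, 6): 5, (5, 1): 4, (5, 3): 1,
--           (5, 4): 6, (5, 6): 3, (6, 2): 3, (6, 3): 5, (6, 4): 2, (6, 5): 4}
--
-- def Pivoting_die(instruction_list, goal_cell_number):
--     # Track only (top, front); opposite faces always sum to 7, and the right
--     # face is determined by (top, front) via _RIGHT.  Expand to the full
--     # six-face list once at the end.
--     top, front = 3, 2
--     for i in range(goal_cell_number):
--         ins = instruction_list[i]
--         if ins == 'right':
--             top = 7 - _RIGHT[(top, front)]
--         elif ins == 'left':
--             top = _RIGHT[(top, front)]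
--         elif ins == 'down':
--             top, front = 7 - front, top
--         elif ins == 'up':
--             top, front = front, 7 - top
--         else:
--             raise KeyError(ins)
--     r = _RIGHT[(top, front)]
--     return [top, front, r, 7 - r, 7 - top, 7 - front]
-- ===== Notes on version B (the rewrite author's own statement) =====
-- stated objective: alternative
-- what changed: A mutates a full 6-face orientation list with four hand-written swap rules; B compresses the state to the pair (top, front), exploiting that opposite faces sum to 7 and that the right face is a function of (top, front) via a 24-entry orientation table, updating the pair arithmetically per move and expanding to the 6-face list once at the end.
import Mathlib
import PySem

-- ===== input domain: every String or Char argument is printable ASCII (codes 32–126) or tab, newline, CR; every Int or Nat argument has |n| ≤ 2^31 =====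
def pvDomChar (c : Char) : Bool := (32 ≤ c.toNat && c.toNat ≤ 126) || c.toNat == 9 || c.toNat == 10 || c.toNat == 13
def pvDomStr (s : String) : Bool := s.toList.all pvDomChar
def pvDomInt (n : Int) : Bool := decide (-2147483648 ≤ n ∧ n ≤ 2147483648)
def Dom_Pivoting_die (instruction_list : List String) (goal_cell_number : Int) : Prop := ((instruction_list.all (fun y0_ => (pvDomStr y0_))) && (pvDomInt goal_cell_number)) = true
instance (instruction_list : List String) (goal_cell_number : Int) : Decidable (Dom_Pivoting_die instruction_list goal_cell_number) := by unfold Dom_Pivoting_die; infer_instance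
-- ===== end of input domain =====

-- B replaces A's four in-place 6-face swap rules by a compressed (top, front) state:
-- opposite faces sum to 7 and the right face is a 24-entry function of (top, front);
-- the full six-face list is produced once at the end (alternative decomposition, same cost).

-- ===== PORT A =====
-- Each rule is exact on the 6-element lists it is actually applied to
-- (the `_ => L` arm is unreachable: the state always has length 6).
def pvRightRule (L : List Int) : List Int :=
  match L with
  | [right, front, bottom, top, left, back] => [top, front, right, left, bottom, back]
  | _ => L

def pvDownRule (L : List Int) : List Int :=
  match L with
  | [front, bottom, right, left, back, top] => [top, front, right, left, bottom, back]
  | _ => L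

def pvLeftRule (L : List Int) : List Int :=
  match L with
  | [left, front, top, bottom, right, back] => [top, front, right, left, bottom, back]
  | _ => L

def pvUpRule (L : List Int) : List Int :=
  match L with
  | [back, top, right, left, front, bottom] => [top, front, right, left, bottom, back]
  | _ => L

-- dice_rule dict: none = KeyError
def pvRuleOf? (s : String) : Option (List Int → List Int) :=
  if s == "right" then some pvRightRule
  else if s == "down" then some pvDownRule
  else if s == "left" then some pvLeftRule
  else if s == "up" then some pvUpRule
  else none

-- The loop carries Option: none records that Python raised (IndexError/KeyError);
-- Pre_ excludes those inputs, `.getD []` is never reached under Pre_.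
def Pivoting_die (instruction_list : List String) (goal_cell_number : Int) : List Int :=
  let diceList : List Int := [3, 2, 1, 6, 4, 5]
  if goal_cell_number == 0 then diceList
  else
    (((PySem.List.pyRange 0 goal_cell_number 1).foldl
        (fun acc i => acc.bind fun L =>
          (PySem.List.pyGet? instruction_list i).bind fun s =>
          (pvRuleOf? s).map fun rule => rule L)
        (some diceList)).getD [])

-- ===== PORT B =====
-- _RIGHT table: right face of each of the 24 legal (top, front) orientations;
-- none = KeyError (unreachable under Pre_).
def pvRightOf? (t f : Int) : Option Int :=
  List.lookup (t, f)
    [((1, 2), 4), ((1, 3), 2), ((1, 4), 5), ((1, 5), 3), ((2, 1), 3), ((2, 3), 6),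
     ((2, 4), 1), ((2, 6), 4), ((3, 1), 5), ((3, 2), 1), ((3, 5), 6), ((3, 6), 2),
     ((4, 1), 2), ((4, 2), 6), ((4, 5), 1), ((4, 6), 5), ((5, 1), 4), ((5, 3), 1),
     ((5, 4), 6), ((5, 6), 3), ((6, 2), 3), ((6, 3), 5), ((6, 4), 2), ((6, 5), 4)]

-- one loop iteration of Source B: none records a raised IndexError/KeyError
def pvStepB (instruction_list : List String) (st : Option (Int × Int)) (i : Int) :
    Option (Int × Int) :=
  st.bind fun tf =>
    (PySem.List.pyGet? instruction_list i).bind fun ins =>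
      if ins == "right" then (pvRightOf? tf.1 tf.2).map fun r => (7 - r, tf.2)
      else if ins == "left" then (pvRightOf? tf.1 tf.2).map fun r => (r, tf.2)
      else if ins == "down" then some (7 - tf.2, tf.1)
      else if ins == "up" then some (tf.2, 7 - tf.1)
      else none

def Pivoting_die_alt (instruction_list : List String) (goal_cell_number : Int) : List Int :=
  ((((PySem.List.pyRange 0 goal_cell_number 1).foldl (pvStepB instruction_list)
      (some (3, 2))).bind fun tf =>
    (pvRightOf? tf.1 tf.2).map fun r =>
      [tf.1, tf.2, r, 7 - r, 7 - tf.1, 7 - tf.2]).getD [])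

-- ===== PRECONDITION & SPEC =====
-- Pre_: exactly the inputs on which Python A returns (no IndexError from
-- instruction_list[i], no KeyError from dice_rule[...]); for goal_cell_number ≤ 0
-- the loop body never runs and A always returns.
def Pre_Pivoting_die (instruction_list : List String) (goal_cell_number : Int) : Prop :=
  0 < goal_cell_number →
    goal_cell_number ≤ instruction_list.length ∧
    ∀ s ∈ instruction_list.take goal_cell_number.toNat,
      s = "right" ∨ s = "down" ∨ s = "left" ∨ s = "up"

instance (instruction_list : List String) (goal_cell_number : Int) : Decidable (Pre_Pivoting_die instruction_list goal_cell_number) := by unfold Pre_Pivoting_die; infer_instance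

def pvWitness_Pivoting_die : List String × Int := (["right", "up", "down"], 2)

def Spec_Pivoting_die (instruction_list : List String) (goal_cell_number : Int) (out : List Int) : Prop := out = Pivoting_die_alt instruction_list goal_cell_number
instance (instruction_list : List String) (goal_cell_number : Int) (out : List Int) : Decidable (Spec_Pivoting_die instruction_list goal_cell_number out) := by unfold Spec_Pivoting_die; infer_instance

-- ===== CLAIM =====
def Claim_equal_Pivoting_die : Prop := ∀ (instruction_list : List String) (goal_cell_number : Int), Dom_Pivoting_die instruction_list goal_cell_number → Pre_Pivoting_die instruction_list goal_cell_number → Spec_Pivoting_die instruction_list goal_cell_number (Pivoting_die instruction_list goal_cell_number)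

-- ===== LEMMAS AND PROOFS =====

-- the 24 legal (top, front) pairs
def pvStates : List (Int × Int) :=
  [(1, 2), (1, 3), (1, 4), (1, 5), (2, 1), (2, 3), (2, 4), (2, 6),
   (3, 1), (3, 2), (3, 5), (3, 6), (4, 1), (4, 2), (4, 5), (4, 6),
   (5, 1), (5, 3), (5, 4), (5, 6), (6, 2), (6, 3), (6, 4), (6, 5)]

-- the full face list determined by (top, front)
def pvExpand (t f : Int) : List Int :=
  [t, f, (pvRightOf? t f).getD 0, 7 - (pvRightOf? t f).getD 0, 7 - t, 7 - f]

-- one checkable fact per state: the lookup succeeds, and each of A's four rules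
-- on the expanded list matches the expansion of B's updated pair, which is legal
def pvGood (p : Int × Int) : Bool :=
  match pvRightOf? p.1 p.2 with
  | none => false
  | some r =>
    (pvRightRule (pvExpand p.1 p.2) == pvExpand (7 - r) p.2) && pvStates.contains (7 - r, p.2) &&
    (pvLeftRule (pvExpand p.1 p.2) == pvExpand r p.2) && pvStates.contains (r, p.2) &&
    (pvDownRule (pvExpand p.1 p.2) == pvExpand (7 - p.2) p.1) && pvStates.contains (7 - p.2, p.1) &&
    (pvUpRule (pvExpand p.1 p.2) == pvExpand p.2 (7 - p.1)) && pvStates.contains (p.2, 7 - p.1)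

theorem pvGood_all : pvStates.all pvGood = true := by decide

-- relation between A's loop state and B's: exceptions coincide; on success A's
-- list is the expansion of B's legal pair
def pvRel (oa : Option (List Int)) (ob : Option (Int × Int)) : Prop :=
  match oa, ob with
  | none, none => True
  | some L, some tf => tf ∈ pvStates ∧ L = pvExpand tf.1 tf.2
  | _, _ => False

theorem pvRel_step (instruction_list : List String) (i : Int) (oa : Option (List Int))
    (ob : Option (Int × Int)) (h : pvRel oa ob) :
    pvRel (oa.bind fun L => (PySem.List.pyGet? instruction_list i).bind fun s =>
            (pvRuleOf? s).map fun rule => rule L)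
          (pvStepB instruction_list ob i) := by
  cases oa with
  | none =>
    cases ob with
    | none => exact trivial
    | some tf => exact absurd h (by simp [pvRel])
  | some L =>
    cases ob with
    | none => exact absurd h (by simp [pvRel])
    | some tf =>
      obtain ⟨hmem, hL⟩ := h
      have hg : pvGood tf = true := List.all_eq_true.mp pvGood_all tf hmem
      obtain ⟨t, f⟩ := tf
      cases hr : pvRightOf? t f with
      | none => rw [pvGood, hr] at hg; exact absurd hg (by simp)
      | some r =>
        rw [pvGood, hr] at hg
        simp only [Bool.and_eq_true, beq_iff_eq, List.contains_eq_mem, decide_eq_true_eq] at hg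
        obtain ⟨⟨⟨⟨⟨⟨⟨e1, m1⟩, e2⟩, m2⟩, e3⟩, m3⟩, e4⟩, m4⟩ := hg
        subst hL
        unfold pvStepB
        cases hs : PySem.List.pyGet? instruction_list i with
        | none => simp [pvRel]
        | some s =>
          simp only [Option.bind_some]
          by_cases h1 : s = "right"
          · simp [h1, pvRuleOf?, hr, pvRel]; exact ⟨m1, e1⟩
          · by_cases h2 : s = "down"
            · simp [h2, pvRuleOf?, pvRel]; exact ⟨m3, e3⟩
            · by_cases h3 : s = "left"
              · simp [h3, pvRuleOf?, hr, pvRel]; exact ⟨m2, e2⟩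
              · by_cases h4 : s = "up"
                · simp [h4, pvRuleOf?, pvRel]; exact ⟨m4, e4⟩
                · simp [pvRuleOf?, h1, h2, h3, h4, pvRel]

theorem pvRel_fold (instruction_list : List String) (idxs : List Int)
    (oa : Option (List Int)) (ob : Option (Int × Int)) (h : pvRel oa ob) :
    pvRel (idxs.foldl (fun acc i => acc.bind fun L =>
            (PySem.List.pyGet? instruction_list i).bind fun s =>
            (pvRuleOf? s).map fun rule => rule L) oa)
          (idxs.foldl (pvStepB instruction_list) ob) := by
  induction idxs generalizing oa ob with
  | nil => exact h
  | cons i rest ih => exact ih _ _ (pvRel_step instruction_list i oa ob h)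

-- ===== VERDICT =====
theorem Pivoting_die_spec : Claim_equal_Pivoting_die := by
  intro il g _ _
  unfold Spec_Pivoting_die Pivoting_die Pivoting_die_alt
  have hbase : pvRel (some ([3, 2, 1, 6, 4, 5] : List Int)) (some ((3, 2) : Int × Int)) := by
    constructor
    · decide
    · decide
  have h := pvRel_fold il (PySem.List.pyRange 0 g 1) _ _ hbase
  by_cases hg : g = 0
  · subst hg
    simp [PySem.List.pyRange]
    decide
  · simp only [beq_iff_eq, hg, if_false]
    revert h
    cases (PySem.List.pyRange 0 g 1).foldl (fun acc i => acc.bind fun L =>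
        (PySem.List.pyGet? il i).bind fun s =>
        (pvRuleOf? s).map fun rule => rule L) (some ([3, 2, 1, 6, 4, 5] : List Int)) with
    | none =>
      cases (PySem.List.pyRange 0 g 1).foldl (pvStepB il) (some ((3, 2) : Int × Int)) with
      | none => intro _; rfl
      | some tf => intro h; exact absurd h (by simp [pvRel])
    | some L =>
      cases hb : (PySem.List.pyRange 0 g 1).foldl (pvStepB il) (some ((3, 2) : Int × Int)) with
      | none => intro h; exact absurd h (by simp [pvRel])
      | some tf =>
        intro h
        obtain ⟨hmem, hL⟩ := h
        have hg' : pvGood tf = true := List.all_eq_true.mp pvGood_all tf hmem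
        obtain ⟨t, f⟩ := tf
        cases hr : pvRightOf? t f with
        | none => rw [pvGood, hr] at hg'; exact absurd hg' (by simp)
        | some r =>
          subst hL
          simp [pvExpand, hr]
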